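-- pv_equiv track=rewrite | github.com/Kosaaaaa/advent-of-code | aoc2022/day17/part1.py | format_coords_hash
-- ===== SOURCE A (Python) =====
-- def format_coords_hash(coords: set[tuple[int, int]]) -> str:
--     min_x = min(x for x, _ in coords)
--     max_x = max(x for x, _ in coords)
--     min_y = min(y for _, y in coords)
--     max_y = max(y for _, y in coords)
--     return '\n'.join(
--         ''.join(
--             '#' if (x, y) in coords else ' '
--             for x in range(min_x, max_x + 1)
--         )
--         for y in range(max_y, min_y - 1, -1)
--     )
-- ===== SOURCE B (Python) =====
-- def format_coords_hash(coords: set[tuple[int, int]]) -> str: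
--     min_x = min(x for x, _ in coords)
--     max_x = max(x for x, _ in coords)
--     min_y = min(y for _, y in coords)
--     max_y = max(y for _, y in coords)
--     grid = [[' '] * (max_x - min_x + 1) for _ in range(max_y - min_y + 1)]
--     for x, y in coords:
--         grid[max_y - y][x - min_x] = '#'
--     return '\n'.join(''.join(row) for row in grid)
-- ===== Notes on version B (the rewrite author's own statement) =====
-- stated objective: faster
-- what changed: Instead of testing membership at every grid cell inside nested comprehensions, B allocates a mutable list-of-lists grid of spaces once and scatters each coordinate into grid[max_y-y][x-min_x] in a single pass over the points, then joins the rows.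
import Mathlib
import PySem

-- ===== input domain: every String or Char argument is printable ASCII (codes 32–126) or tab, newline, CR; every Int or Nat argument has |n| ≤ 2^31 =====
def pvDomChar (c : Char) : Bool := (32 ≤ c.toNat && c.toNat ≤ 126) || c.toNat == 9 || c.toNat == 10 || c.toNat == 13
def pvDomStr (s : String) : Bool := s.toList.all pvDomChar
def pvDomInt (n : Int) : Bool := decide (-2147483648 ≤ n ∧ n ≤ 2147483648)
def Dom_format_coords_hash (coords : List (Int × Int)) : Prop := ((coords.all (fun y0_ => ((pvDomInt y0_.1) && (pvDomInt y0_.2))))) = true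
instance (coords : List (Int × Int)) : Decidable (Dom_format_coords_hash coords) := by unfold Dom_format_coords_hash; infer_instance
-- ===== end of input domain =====

-- B scatters the points into a mutable grid built once, instead of A's per-cell membership test; same return value.

-- ===== PORT A =====
def format_coords_hash (coords : List (Int × Int)) : String :=
  match PySem.List.min? (coords.map Prod.fst) (fun v => v),
        PySem.List.max? (coords.map Prod.fst) (fun v => v),
        PySem.List.min? (coords.map Prod.snd) (fun v => v),
        PySem.List.max? (coords.map Prod.snd) (fun v => v) with
  | some min_x, some max_x, some min_y, some max_y =>
      PySem.Str.join "\n"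
        ((PySem.List.pyRange max_y (min_y - 1) (-1)).map (fun y =>
          PySem.Str.join ""
            ((PySem.List.pyRange min_x (max_x + 1) 1).map (fun x =>
              if (x, y) ∈ coords then "#" else " "))))
  | _, _, _, _ => ""   -- Python raises ValueError on empty input; excluded by Pre_

-- ===== PORT B =====
def format_coords_hash_alt (coords : List (Int × Int)) : String :=
  match PySem.List.min? (coords.map Prod.fst) (fun v => v) with
  | none => ""   -- Python raises ValueError on empty input; excluded by Pre_
  | some min_x =>
  match PySem.List.max? (coords.map Prod.fst) (fun v => v) with
  | none => ""
  | some max_x =>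
  match PySem.List.min? (coords.map Prod.snd) (fun v => v) with
  | none => ""
  | some min_y =>
  match PySem.List.max? (coords.map Prod.snd) (fun v => v) with
  | none => ""
  | some max_y =>
      let grid0 : List (List String) :=
        List.replicate (max_y - min_y + 1).toNat (List.replicate (max_x - min_x + 1).toNat " ")
      let grid := coords.foldl
        (fun g p => g.modify (max_y - p.2).toNat (fun row => row.set (p.1 - min_x).toNat "#")) grid0
      PySem.Str.join "\n" (grid.map (fun row => PySem.Str.join "" row))

-- ===== PRECONDITION & SPEC =====
-- Pre_ excludes exactly the empty list, on which Python's min() raises ValueError.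
def Pre_format_coords_hash (coords : List (Int × Int)) : Prop := coords ≠ []
instance (coords : List (Int × Int)) : Decidable (Pre_format_coords_hash coords) := by unfold Pre_format_coords_hash; infer_instance
def pvWitness_format_coords_hash : (List (Int × Int)) := [(0, 0), (2, 1)]

def Spec_format_coords_hash (coords : List (Int × Int)) (out : String) : Prop := out = format_coords_hash_alt coords
instance (coords : List (Int × Int)) (out : String) : Decidable (Spec_format_coords_hash coords out) := by unfold Spec_format_coords_hash; infer_instance

-- ===== CLAIM (what is proved, stated in full; the proofs are below) =====
def Claim_equal_format_coords_hash : Prop := ∀ (coords : List (Int × Int)), Dom_format_coords_hash coords → Pre_format_coords_hash coords → Spec_format_coords_hash coords (format_coords_hash coords)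

-- ===== LEMMAS AND PROOFS =====

-- the grid seen as a pure function of the membership list q
def pvGrid (minx maxx miny maxy : Int) (q : List (Int × Int)) : List (List String) :=
  (PySem.List.pyRange maxy (miny - 1) (-1)).map (fun y =>
    (PySem.List.pyRange minx (maxx + 1) 1).map (fun x =>
      if (x, y) ∈ q then "#" else " "))

lemma pvGrid_congr (minx maxx miny maxy : Int) (q q' : List (Int × Int))
    (h : ∀ z, z ∈ q ↔ z ∈ q') :
    pvGrid minx maxx miny maxy q = pvGrid minx maxx miny maxy q' := by
  unfold pvGrid
  refine List.map_congr_left (fun y _ => ?_)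
  refine List.map_congr_left (fun x _ => ?_)
  simp [h]

lemma pvGrid_empty (minx maxx miny maxy : Int) :
    pvGrid minx maxx miny maxy [] =
      List.replicate (maxy - miny + 1).toNat (List.replicate (maxx - minx + 1).toNat " ") := by
  unfold pvGrid
  rw [PySem.List.pyRange_neg_one, PySem.List.pyRange_one]
  have h1 : (maxy - (miny - 1)).toNat = (maxy - miny + 1).toNat := by omega
  have h2 : (maxx + 1 - minx).toNat = (maxx - minx + 1).toNat := by omega
  simp [Function.comp_def, h1, h2]

lemma pvGrid_step (minx maxx miny maxy : Int) (q : List (Int × Int)) (p : Int × Int)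
    (hx1 : minx ≤ p.1) (hx2 : p.1 ≤ maxx) (hy1 : miny ≤ p.2) (hy2 : p.2 ≤ maxy) :
    (pvGrid minx maxx miny maxy q).modify (maxy - p.2).toNat
        (fun row => row.set (p.1 - minx).toNat "#")
      = pvGrid minx maxx miny maxy (p :: q) := by
  unfold pvGrid
  rw [PySem.List.pyRange_neg_one, PySem.List.pyRange_one]
  apply List.ext_getElem
  · simp
  · intro i h1 h2
    simp only [List.getElem_modify, List.getElem_map, List.getElem_range]
    have hi : i < (maxy - (miny - 1)).toNat := by simpa using h2
    by_cases hrow : (maxy - p.2).toNat = i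
    · simp only [if_pos hrow]
      apply List.ext_getElem
      · simp
      · intro j g1 g2
        simp only [List.getElem_set, List.getElem_map, List.getElem_range]
        have hj : j < (maxx + 1 - minx).toNat := by simpa using g2
        by_cases hcol : (p.1 - minx).toNat = j
        · have hp : (minx + (j : Int), maxy - (i : Int)) = p := by
            obtain ⟨p1, p2⟩ := p
            simp only [Prod.mk.injEq]
            simp only at hx1 hx2 hy1 hy2 hrow hcol
            constructor <;> omega
          simp [hcol, hp]
        · have hp : (minx + (j : Int), maxy - (i : Int)) ≠ p := by
            intro he
            cases p
            simp only [Prod.mk.injEq] at he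
            apply hcol
            omega
          simp [if_neg hcol, hp]
    · simp only [if_neg hrow]
      apply List.map_congr_left
      intro x _
      have hp : (x, maxy - (i : Int)) ≠ p := by
        intro he
        cases p
        simp only [Prod.mk.injEq] at he
        apply hrow
        omega
      simp [hp]

lemma pvScatter_eq (minx maxx miny maxy : Int) (cs : List (Int × Int)) :
    ∀ q : List (Int × Int),
    (∀ p ∈ cs, minx ≤ p.1 ∧ p.1 ≤ maxx ∧ miny ≤ p.2 ∧ p.2 ≤ maxy) →
    cs.foldl (fun g p => g.modify (maxy - p.2).toNat (fun row => row.set (p.1 - minx).toNat "#"))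
        (pvGrid minx maxx miny maxy q)
      = pvGrid minx maxx miny maxy (cs ++ q) := by
  induction cs with
  | nil => intro q _; simp
  | cons p cs ih =>
      intro q hb
      have hp := hb p (by simp)
      simp only [List.foldl_cons]
      rw [pvGrid_step minx maxx miny maxy q p hp.1 hp.2.1 hp.2.2.1 hp.2.2.2]
      rw [ih (p :: q) (fun r hr => hb r (by simp [hr]))]
      apply pvGrid_congr
      intro z
      simp
      tauto

-- ===== VERDICT (by name: the statement is the Claim_ definition above) =====
theorem format_coords_hash_spec : Claim_equal_format_coords_hash := by
  intro coords _ hne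
  unfold Pre_format_coords_hash at hne
  unfold Spec_format_coords_hash format_coords_hash format_coords_hash_alt
  obtain ⟨minx, hminx⟩ : ∃ v, PySem.List.min? (coords.map Prod.fst) (fun v => v) = some v := by
    cases h : PySem.List.min? (coords.map Prod.fst) (fun v => v) with
    | none => rw [PySem.List.min?_eq_none_iff] at h
              exact absurd (List.map_eq_nil_iff.mp h) hne
    | some v => exact ⟨v, rfl⟩
  obtain ⟨maxx, hmaxx⟩ : ∃ v, PySem.List.max? (coords.map Prod.fst) (fun v => v) = some v := by
    cases h : PySem.List.max? (coords.map Prod.fst) (fun v => v) with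
    | none => rw [PySem.List.max?_eq_none_iff] at h
              exact absurd (List.map_eq_nil_iff.mp h) hne
    | some v => exact ⟨v, rfl⟩
  obtain ⟨miny, hminy⟩ : ∃ v, PySem.List.min? (coords.map Prod.snd) (fun v => v) = some v := by
    cases h : PySem.List.min? (coords.map Prod.snd) (fun v => v) with
    | none => rw [PySem.List.min?_eq_none_iff] at h
              exact absurd (List.map_eq_nil_iff.mp h) hne
    | some v => exact ⟨v, rfl⟩
  obtain ⟨maxy, hmaxy⟩ : ∃ v, PySem.List.max? (coords.map Prod.snd) (fun v => v) = some v := by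
    cases h : PySem.List.max? (coords.map Prod.snd) (fun v => v) with
    | none => rw [PySem.List.max?_eq_none_iff] at h
              exact absurd (List.map_eq_nil_iff.mp h) hne
    | some v => exact ⟨v, rfl⟩
  rw [hminx, hmaxx, hminy, hmaxy]
  have hb : ∀ p ∈ coords, minx ≤ p.1 ∧ p.1 ≤ maxx ∧ miny ≤ p.2 ∧ p.2 ≤ maxy := by
    intro p hp
    refine ⟨PySem.List.min?_isMin hminx _ (List.mem_map_of_mem hp),
            PySem.List.max?_isMax hmaxx _ (List.mem_map_of_mem hp),
            PySem.List.min?_isMin hminy _ (List.mem_map_of_mem hp),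
            PySem.List.max?_isMax hmaxy _ (List.mem_map_of_mem hp)⟩
  have hgrid :
      coords.foldl (fun g p => g.modify (maxy - p.2).toNat (fun row => row.set (p.1 - minx).toNat "#"))
          (List.replicate (maxy - miny + 1).toNat (List.replicate (maxx - minx + 1).toNat " "))
        = pvGrid minx maxx miny maxy coords := by
    rw [← pvGrid_empty minx maxx miny maxy, pvScatter_eq minx maxx miny maxy coords [] hb]
    simp
  simp only [hgrid]
  unfold pvGrid
  rw [List.map_map]
  rfl
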